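-- pv_equiv track=rewrite | github.com/JKen0/test-projects | python/matchingSentenceQuery.py | function
-- ===== SOURCE A (Python) =====
-- def matching(queryWords, sentenceWords):
--     for qWord in queryWords:
--         found = False;
--         for sWord in  sentenceWords:
--             if(qWord == sWord):
--                 found = True;
--                 break;
--
--         if(not found):
--             return False;
--     return True;
--
-- def function(sentences, queries):
--     allMatches = [];
--     for i, iele in enumerate(queries):
--         queryMatches = [];
--         queryWords = iele.split(' ');
--
--         for j, jele in enumerate(sentences):
--             sentenceWords = jele.split(' ');
--
--             isMatching = matching(queryWords, sentenceWords)
--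
--             if(isMatching):
--                 queryMatches.append(j);
--
--         if(len(queryMatches) == 0):
--             queryMatches.append(-1)
--
--         allMatches.append(queryMatches)
--
--     return allMatches;
-- ===== SOURCE B (Python) =====
-- def function(sentences, queries):
--     # inverted index: word -> set of sentence indices containing it
--     index = {}
--     for j, s in enumerate(sentences):
--         for w in s.split(' '):
--             index.setdefault(w, set()).add(j)
--     out = []
--     for q in queries:
--         result = set(range(len(sentences)))
--         for w in q.split(' '):
--             result &= index.get(w, set())
--         out.append(sorted(result) if result else [-1])
--     return out
-- ===== Notes on version B (the rewrite author's own statement) =====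
-- stated objective: faster
-- what changed: Replaces A's nested per-query/per-sentence/per-word scanning with an inverted index (word -> set of sentence indices) built once, answered per query by set intersection and a final sort.
import Mathlib
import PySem

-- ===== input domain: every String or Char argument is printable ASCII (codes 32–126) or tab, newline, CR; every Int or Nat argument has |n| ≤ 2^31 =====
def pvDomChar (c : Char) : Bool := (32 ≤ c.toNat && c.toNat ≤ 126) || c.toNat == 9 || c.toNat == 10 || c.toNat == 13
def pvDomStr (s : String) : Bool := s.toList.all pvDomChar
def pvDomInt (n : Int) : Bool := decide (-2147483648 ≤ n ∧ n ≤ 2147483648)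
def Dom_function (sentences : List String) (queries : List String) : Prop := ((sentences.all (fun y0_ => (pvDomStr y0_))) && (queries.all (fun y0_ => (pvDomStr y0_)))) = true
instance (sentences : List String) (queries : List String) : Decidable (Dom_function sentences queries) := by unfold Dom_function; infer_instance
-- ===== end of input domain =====

-- B replaces A's per-query scan of every sentence's word list by an inverted index
-- (word -> set of sentence indices) built once, with per-query set intersection.

-- s.split(' ') (sep ≠ "", so split? is always `some`)
def pvWords (s : String) : List String := (PySem.Str.split? s " ").getD []

-- ===== PORT A =====
-- inner 'for sWord in sentenceWords: if qWord == sWord: found = True; break'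
def pvFound (qWord : String) : List String → Bool
  | [] => false
  | sWord :: rest => if qWord == sWord then true else pvFound qWord rest

-- 'for qWord in queryWords: … if not found: return False' / 'return True'
def pvMatching : List String → List String → Bool
  | [], _ => true
  | qWord :: rest, sentenceWords =>
      if pvFound qWord sentenceWords then pvMatching rest sentenceWords else false

def function (sentences : List String) (queries : List String) : List (List Int) :=
  (PySem.List.enumerate queries).foldl (fun allMatches ie =>
    let queryWords := pvWords ie.2
    let queryMatches := (PySem.List.enumerate sentences).foldl (fun qm je =>
      let sentenceWords := pvWords je.2
      if pvMatching queryWords sentenceWords then qm ++ [je.1] else qm) []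
    let queryMatches := if queryMatches.length = 0 then queryMatches ++ [-1] else queryMatches
    allMatches ++ [queryMatches]) []

-- ===== PORT B =====
-- inverted index: word -> set of indices of the sentences containing it
def pvIndex (sentences : List String) : PySem.Dict String (PySem.Set Int) :=
  (PySem.List.enumerate sentences).foldl (fun d je =>
    (pvWords je.2).foldl
      (fun d w => d.insert w (PySem.Set.add (d.getD w PySem.Set.empty) je.1)) d)
    PySem.Dict.empty

def function_alt (sentences : List String) (queries : List String) : List (List Int) :=
  let index := pvIndex sentences
  queries.map (fun q =>
    let result := (pvWords q).foldl
      (fun r w => PySem.Set.inter r (index.getD w PySem.Set.empty))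
      (PySem.Set.ofList (PySem.List.pyRange 0 sentences.length 1))
    if PySem.Set.len result = 0 then [-1] else PySem.List.sorted result (fun x => x) false)

-- ===== PRECONDITION & SPEC =====
def Spec_function (sentences : List String) (queries : List String) (out : List (List Int)) : Prop := out = function_alt sentences queries
instance (sentences : List String) (queries : List String) (out : List (List Int)) : Decidable (Spec_function sentences queries out) := by unfold Spec_function; infer_instance

-- ===== CLAIM (what is proved, stated in full; the proofs are below) =====
def Claim_equal_function : Prop := ∀ (sentences : List String) (queries : List String), Dom_function sentences queries → Spec_function sentences queries (function sentences queries)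

-- ===== LEMMAS AND PROOFS =====

theorem pvFound_iff (q : String) (sw : List String) : pvFound q sw = true ↔ q ∈ sw := by
  induction sw with
  | nil => simp [pvFound]
  | cons s rest ih =>
      by_cases h : q = s
      · simp [pvFound, h]
      · simp [pvFound, beq_iff_eq, h, ih]

theorem pvMatching_iff (ws sw : List String) :
    pvMatching ws sw = true ↔ ∀ q ∈ ws, q ∈ sw := by
  induction ws with
  | nil => simp [pvMatching]
  | cons q rest ih =>
      simp only [pvMatching]
      by_cases h : pvFound q sw = true
      · rw [if_pos h, ih]
        constructor
        · intro hr x hx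
          rcases List.mem_cons.mp hx with rfl | hx'
          · exact (pvFound_iff x sw).mp h
          · exact hr x hx'
        · intro hr x hx
          exact hr x (List.mem_cons.mpr (Or.inr hx))
      · rw [if_neg h]
        simp only [Bool.false_eq_true, false_iff]
        intro hall
        exact h ((pvFound_iff q sw).mpr (hall q (List.mem_cons_self)))

-- one sentence's word loop: what ends up in the posting set of v
theorem pv_mem_wordFold (ws : List String) (d : PySem.Dict String (PySem.Set Int))
    (i : Int) (v : String) (j : Int) :
    j ∈ ((ws.foldl (fun d w => d.insert w (PySem.Set.add (d.getD w PySem.Set.empty) i)) d).getD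
          v PySem.Set.empty)
      ↔ j ∈ d.getD v PySem.Set.empty ∨ (v ∈ ws ∧ j = i) := by
  induction ws generalizing d with
  | nil => simp
  | cons w rest ih =>
      simp only [List.foldl_cons, ih, PySem.Dict.getD_insert]
      by_cases h : v = w
      · subst h
        simp only [if_true, PySem.Set.mem_add]
        tauto
      · simp only [h, if_false, List.mem_cons]
        tauto

-- the index fold over any list of (index, sentence) pairs
theorem pv_mem_indexFold (ps : List (Int × String)) (d : PySem.Dict String (PySem.Set Int))
    (v : String) (j : Int) :
    j ∈ ((ps.foldl (fun d je =>
            (pvWords je.2).foldl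
              (fun d w => d.insert w (PySem.Set.add (d.getD w PySem.Set.empty) je.1)) d) d).getD
          v PySem.Set.empty)
      ↔ j ∈ d.getD v PySem.Set.empty ∨ ∃ p ∈ ps, v ∈ pvWords p.2 ∧ j = p.1 := by
  induction ps generalizing d with
  | nil => simp
  | cons p rest ih =>
      simp only [List.foldl_cons, ih, pv_mem_wordFold]
      constructor
      · rintro (((h | ⟨hv, hj⟩) | ⟨q, hq, hvq, hjq⟩))
        · exact Or.inl h
        · exact Or.inr ⟨p, by simp, hv, hj⟩
        · exact Or.inr ⟨q, by simp [hq], hvq, hjq⟩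
      · rintro (h | ⟨q, hq, hvq, hjq⟩)
        · exact Or.inl (Or.inl h)
        · rcases List.mem_cons.mp hq with rfl | hq'
          · exact Or.inl (Or.inr ⟨hvq, hjq⟩)
          · exact Or.inr ⟨q, hq', hvq, hjq⟩

-- membership in a posting set of the built index
theorem pv_mem_index (sentences : List String) (v : String) (j : Int) :
    j ∈ ((pvIndex sentences).getD v PySem.Set.empty)
      ↔ ∃ k : Nat, ∃ _ : k < sentences.length, v ∈ pvWords sentences[k] ∧ j = (k : Int) := by
  unfold pvIndex
  rw [pv_mem_indexFold]
  simp only [PySem.Dict.getD_empty]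
  constructor
  · rintro (h | ⟨p, hp, hv, hj⟩)
    · simp [PySem.Set.empty] at h
    · rcases (PySem.List.mem_enumerate_iff sentences 0 p).mp hp with ⟨k, hk, rfl⟩
      exact ⟨k, hk, hv, by simpa using hj⟩
  · rintro ⟨k, hk, hv, rfl⟩
    exact Or.inr ⟨((k : Int), sentences[k]),
      (PySem.List.mem_enumerate_iff sentences 0 _).mpr ⟨k, hk, by simp⟩, hv, rfl⟩

-- the intersection fold is a filter of the initial set
theorem pv_interFold (ws : List String) (P : String → PySem.Set Int) (init : List Int) :
    ws.foldl (fun r w => PySem.Set.inter r (P w)) init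
      = init.filter (fun j => ws.all (fun w => (P w).contains j)) := by
  induction ws generalizing init with
  | nil => simp
  | cons w rest ih =>
      rw [List.foldl_cons, ih]
      simp only [PySem.Set.inter, List.filter_filter, List.all_cons]
      apply List.filter_congr
      intro j _
      simp [Bool.and_comm]

-- A's inner sentence loop for one query equals the filtered index range of B
theorem pv_perQuery (sentences : List String) (ws : List String) :
    (PySem.List.enumerate sentences).foldl (fun qm je =>
        if pvMatching ws (pvWords je.2) then qm ++ [je.1] else qm) []
      = (PySem.List.pyRange 0 sentences.length 1).filter
          (fun j => ws.all (fun w => ((pvIndex sentences).getD w PySem.Set.empty).contains j)) := by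
  rw [PySem.List.foldl_append_if (fun je => pvMatching ws (pvWords je.2)) Prod.fst,
      List.nil_append, PySem.List.enumerate_eq_map_pyRange sentences "", List.filter_map,
      List.map_map]
  have hlen : PySem.List.len sentences = (sentences.length : Int) := rfl
  rw [hlen, show (Prod.fst ∘ fun j => (j, PySem.List.pyGetD sentences j "")) = id from rfl,
      List.map_id]
  apply List.filter_congr
  intro j hj
  obtain ⟨h0, hn⟩ := PySem.List.mem_pyRange_one.mp hj
  obtain ⟨k, rfl⟩ : ∃ k : Nat, j = (k : Int) := ⟨j.toNat, (Int.toNat_of_nonneg h0).symm⟩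
  have hk : k < sentences.length := by exact_mod_cast hn
  have hget : PySem.List.pyGetD sentences (k : Int) "" = sentences[k] := by
    rw [PySem.List.pyGetD_natCast, List.getD_eq_getElem sentences "" hk]
  rw [Function.comp, hget]
  apply Bool.eq_iff_iff.mpr
  rw [pvMatching_iff, List.all_eq_true]
  constructor
  · intro hall w hw
    rw [PySem.Set.contains_iff, pv_mem_index]
    exact ⟨k, hk, hall w hw, rfl⟩
  · intro hall w hw
    obtain ⟨k', hk', hvw, hjk⟩ := (pv_mem_index sentences w (k : Int)).mp
      ((PySem.Set.contains_iff _ _).mp (hall w hw))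
    obtain rfl : k' = k := by exact_mod_cast hjk.symm
    exact hvw

theorem function_spec : Claim_equal_function := by
  intro sentences queries _
  unfold Spec_function function function_alt
  rw [PySem.List.foldl_append_singleton_eq_map, List.nil_append,
      show (fun (ie : Int × String) =>
          (fun q =>
            let queryWords := pvWords q
            let queryMatches := (PySem.List.enumerate sentences).foldl (fun qm je =>
              let sentenceWords := pvWords je.2
              if pvMatching queryWords sentenceWords then qm ++ [je.1] else qm) []
            let queryMatches := if queryMatches.length = 0 then queryMatches ++ [-1] else queryMatches
            queryMatches) ie.2)
        = (fun q =>
            let queryWords := pvWords q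
            let queryMatches := (PySem.List.enumerate sentences).foldl (fun qm je =>
              let sentenceWords := pvWords je.2
              if pvMatching queryWords sentenceWords then qm ++ [je.1] else qm) []
            let queryMatches := if queryMatches.length = 0 then queryMatches ++ [-1] else queryMatches
            queryMatches) ∘ (fun (ie : Int × String) => ie.2) from rfl,
      ← List.map_map, PySem.List.map_snd_enumerate]
  refine List.map_congr_left fun q _ => ?_
  show (let queryMatches := _; if queryMatches.length = 0 then queryMatches ++ [-1] else queryMatches) = _
  simp only [pv_perQuery sentences (pvWords q), pv_interFold,
    PySem.Set.ofList_eq_self_of_nodup _ (PySem.List.nodup_pyRange_one 0 sentences.length)]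
  set R := (PySem.List.pyRange 0 sentences.length 1).filter
      (fun j => (pvWords q).all
        (fun w => ((pvIndex sentences).getD w PySem.Set.empty).contains j)) with hR
  have hpw : R.Pairwise (fun a b => (a : Int) ≤ b) :=
    ((PySem.List.pairwise_lt_pyRange_one 0 sentences.length).filter _).imp le_of_lt
  have hsorted : PySem.List.sorted R (fun x => x) = R :=
    PySem.List.sorted_eq_self_of_pairwise R _ hpw
  have hlenR : PySem.Set.len R = (R.length : Int) := rfl
  by_cases hnil : R.length = 0
  · rw [List.length_eq_zero_iff] at hnil
    simp [hnil, PySem.Set.len]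
  · have : ¬ PySem.Set.len R = 0 := by
      rw [hlenR]; exact_mod_cast hnil
    simp only [hnil, if_false, this, hsorted]
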